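-- pv_equiv track=rewrite | github.com/c-mita/AoC | 2015/06.py | is_on
-- ===== SOURCE A (Python) =====
-- def is_on(light, instructions):
--     def _rec(px, py, idx):
--         while idx >= 0:
--             op, (sx, sy), (ex, ey) = instructions[idx]
--             idx -= 1
--             if not (sx <= px <= ex and sy <= py <= ey):
--                 continue
--             if op == "on":
--                 return True
--             elif op == "off":
--                 return False
--             elif op == "toggle":
--                 return not _rec(px, py, idx)
--             else:
--                 raise ValueError("Bad op '%s'" % op)
--         return False
--
--     return _rec(light[0], light[1], len(instructions)-1)
-- ===== SOURCE B (Python) =====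
-- def _eval_backward(ops):
--     toggles = 0
--     for op in ops:
--         if op != "toggle":
--             break
--         toggles += 1
--     parity = toggles % 2 == 1
--     rest = ops[toggles:]
--     if not rest:
--         return parity
--     if rest[0] == "on":
--         return not parity
--     if rest[0] == "off":
--         return parity
--     raise ValueError("Bad op '%s'" % rest[0])
--
--
-- def is_on(light, instructions):
--     px, py = light
--     ops = [op for op, (sx, sy), (ex, ey) in instructions
--            if sx <= px <= ex and sy <= py <= ey]
--     ops.reverse()
--     return _eval_backward(ops)
-- ===== Notes on version B (the rewrite author's own statement) =====
-- stated objective: alternative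
-- what changed: Instead of A's recursion-with-negation over a decreasing index, B first filters the ops of the instructions covering the light into a list, reverses it, counts its leading toggles, and decides the answer in closed form from the first non-toggle op XOR the toggle-count parity.
import Mathlib
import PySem

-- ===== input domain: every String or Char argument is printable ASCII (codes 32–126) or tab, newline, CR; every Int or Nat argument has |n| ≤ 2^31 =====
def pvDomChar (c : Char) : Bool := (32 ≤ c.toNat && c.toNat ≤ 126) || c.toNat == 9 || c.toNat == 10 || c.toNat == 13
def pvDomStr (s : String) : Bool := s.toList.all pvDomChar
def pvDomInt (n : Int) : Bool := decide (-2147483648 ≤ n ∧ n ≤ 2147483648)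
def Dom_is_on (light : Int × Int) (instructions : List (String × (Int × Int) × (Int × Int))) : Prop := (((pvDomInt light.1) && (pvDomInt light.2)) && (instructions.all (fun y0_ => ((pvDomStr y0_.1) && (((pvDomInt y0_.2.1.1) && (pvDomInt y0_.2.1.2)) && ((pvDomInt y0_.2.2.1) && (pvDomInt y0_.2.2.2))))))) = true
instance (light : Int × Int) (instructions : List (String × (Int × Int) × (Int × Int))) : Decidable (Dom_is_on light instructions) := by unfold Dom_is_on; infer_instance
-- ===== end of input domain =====

-- B replaces A's recursion-with-negation by staged passes: filter the covering ops, reverse,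
-- count leading toggles, decide in closed form (alternative decomposition, same cost).

-- ===== PORT A =====
-- A's inner `_rec(px, py, idx)`: the fuel argument n stands for idx+1 (the loop runs while idx ≥ 0).
-- The `raise ValueError` branch returns `false` here; Pre_is_on excludes exactly the inputs that reach it.
def is_on_rec (instructions : List (String × (Int × Int) × (Int × Int))) (px py : Int) : Nat → Bool
  | 0 => false
  | n + 1 =>
    match PySem.List.pyGet? instructions (n : Int) with
    | none => false  -- unreachable: n < len(instructions) whenever called
    | some (op, (sx, sy), (ex, ey)) =>
      if ¬ (sx ≤ px ∧ px ≤ ex ∧ sy ≤ py ∧ py ≤ ey) then is_on_rec instructions px py n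
      else if op == "on" then true
      else if op == "off" then false
      else if op == "toggle" then ! is_on_rec instructions px py n
      else false  -- Python: raise ValueError("Bad op '%s'" % op); excluded by Pre_is_on

def is_on (light : Int × Int) (instructions : List (String × (Int × Int) × (Int × Int))) : Bool :=
  is_on_rec instructions light.1 light.2 instructions.length

-- ===== PORT B =====
-- Source B's `for op in ops: if op != "toggle": break; toggles += 1` counter.
def countToggles : List String → Nat
  | [] => 0
  | op :: rest => if op == "toggle" then countToggles rest + 1 else 0

-- Source B's `_eval_backward(ops)`. `ops[toggles:]` with toggles ≥ 0 is exactly `List.drop toggles`.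
-- The `raise ValueError` branch returns `parity` here; Pre_is_on excludes exactly the inputs that reach it.
def evalBackward (ops : List String) : Bool :=
  let toggles := countToggles ops
  let parity := toggles % 2 == 1
  let rest := ops.drop toggles
  match rest.head? with
  | none => parity
  | some op => if op == "on" then !parity else if op == "off" then parity else parity

def is_on_alt (light : Int × Int) (instructions : List (String × (Int × Int) × (Int × Int))) : Bool :=
  evalBackward (((instructions.filter (fun t =>
      decide (t.2.1.1 ≤ light.1 ∧ light.1 ≤ t.2.2.1 ∧ t.2.1.2 ≤ light.2 ∧ light.2 ≤ t.2.2.2))).map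
      (fun t => t.1)).reverse)

-- ===== PRECONDITION & SPEC =====
-- Pre_is_on is exactly where the Python programs return (no ValueError): scanning the instructions
-- covering the light from the end, the first op that is not "toggle" (if any) must be "on" or "off".
def Pre_is_on (light : Int × Int) (instructions : List (String × (Int × Int) × (Int × Int))) : Prop :=
  let h := (((instructions.filter (fun t =>
            decide (t.2.1.1 ≤ light.1 ∧ light.1 ≤ t.2.2.1 ∧ t.2.1.2 ≤ light.2 ∧ light.2 ≤ t.2.2.2))).map
            (fun t => t.1)).reverse.dropWhile (fun s => s == "toggle")).head?
  h = none ∨ h = some "on" ∨ h = some "off"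
instance (light : Int × Int) (instructions : List (String × (Int × Int) × (Int × Int))) : Decidable (Pre_is_on light instructions) := by unfold Pre_is_on; infer_instance

def pvWitness_is_on : (Int × Int) × (List (String × (Int × Int) × (Int × Int))) :=
  ((1, 1), [("on", (0, 0), (2, 2)), ("toggle", (0, 0), (1, 1)), ("off", (5, 5), (6, 6))])

def Spec_is_on (light : Int × Int) (instructions : List (String × (Int × Int) × (Int × Int))) (out : Bool) : Prop := out = is_on_alt light instructions
instance (light : Int × Int) (instructions : List (String × (Int × Int) × (Int × Int))) (out : Bool) : Decidable (Spec_is_on light instructions out) := by unfold Spec_is_on; infer_instance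

-- ===== CLAIM (what is proved, stated in full; the proofs are below) =====
def Claim_equal_is_on : Prop := ∀ (light : Int × Int) (instructions : List (String × (Int × Int) × (Int × Int))), Dom_is_on light instructions → Pre_is_on light instructions → Spec_is_on light instructions (is_on light instructions)

-- ===== LEMMAS AND PROOFS =====

-- Prepending a toggle flips B's closed-form evaluation.
theorem evalBackward_toggle (r : List String) :
    evalBackward ("toggle" :: r) = ! evalBackward r := by
  rcases Nat.mod_two_eq_zero_or_one (countToggles r) with h | h <;>
  cases hx : r[countToggles r]? <;>
    simp [evalBackward, countToggles, List.head?_drop, hx, Nat.add_mod, h]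

-- A's recursion on fuel n equals B's closed-form evaluation of the reversed covering-ops prefix.
theorem is_on_rec_eq_eval (instructions : List (String × (Int × Int) × (Int × Int)))
    (px py : Int) (n : Nat) (hn : n ≤ instructions.length) :
    is_on_rec instructions px py n =
      evalBackward ((((instructions.take n).filter (fun t =>
        decide (t.2.1.1 ≤ px ∧ px ≤ t.2.2.1 ∧ t.2.1.2 ≤ py ∧ py ≤ t.2.2.2))).map
        (fun t => t.1)).reverse) := by
  induction n with
  | zero => simp [is_on_rec, evalBackward, countToggles]
  | succ m ih =>
    have hm : m < instructions.length := hn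
    have hget : PySem.List.pyGet? instructions (m : Int) = some instructions[m] := by
      rw [PySem.List.pyGet?_natCast]; simp [hm]
    have htake : instructions.take (m + 1) = instructions.take m ++ [instructions[m]] := by
      rw [List.take_add_one]; simp [hm]
    rcases hin : instructions[m] with ⟨op, ⟨sx, sy⟩, ⟨ex, ey⟩⟩
    rw [hin] at hget
    rw [htake, hin]
    simp only [is_on_rec, hget, List.filter_append, List.map_append, List.reverse_append]
    by_cases hc : sx ≤ px ∧ px ≤ ex ∧ sy ≤ py ∧ py ≤ ey
    · have : (List.filter (fun t =>
          decide (t.2.1.1 ≤ px ∧ px ≤ t.2.2.1 ∧ t.2.1.2 ≤ py ∧ py ≤ t.2.2.2))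
          [(op, (sx, sy), (ex, ey))]) = [(op, (sx, sy), (ex, ey))] := by
        simp [List.filter, hc.1, hc.2.1, hc.2.2.1, hc.2.2.2]
      rw [this]
      simp only [List.map_cons, List.map_nil, List.reverse_cons, List.reverse_nil,
        List.nil_append, List.cons_append, if_neg (not_not_intro hc)]
      by_cases h1 : op = "on"
      · subst h1; simp [evalBackward, countToggles]
      · by_cases h2 : op = "off"
        · subst h2; simp [evalBackward, countToggles]
        · by_cases h3 : op = "toggle"
          · subst h3
            rw [evalBackward_toggle]
            simp [ih (Nat.le_of_lt hm)]
          · simp only [beq_iff_eq, h1, h2, h3, if_false]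
            simp [evalBackward, countToggles, h3, h1, h2]
    · have : (List.filter (fun t =>
          decide (t.2.1.1 ≤ px ∧ px ≤ t.2.2.1 ∧ t.2.1.2 ≤ py ∧ py ≤ t.2.2.2))
          [(op, (sx, sy), (ex, ey))]) = [] := by
        have hd : ¬ ((decide (sx ≤ px ∧ px ≤ ex ∧ sy ≤ py ∧ py ≤ ey)) = true) := by
          simpa using hc
        rw [List.filter_cons, if_neg hd, List.filter_nil]
      rw [this]
      simp only [List.map_nil, List.reverse_nil, List.nil_append, if_pos hc]
      exact ih (Nat.le_of_lt hm)

-- ===== VERDICT (by name: the statement is the Claim_ definition above) =====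
theorem is_on_spec : Claim_equal_is_on := by
  intro light instructions _ _
  unfold Spec_is_on is_on is_on_alt
  rw [is_on_rec_eq_eval instructions light.1 light.2 instructions.length (le_refl _)]
  simp
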